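-- pv_equiv track=rewrite | github.com/guinessjulie/planGA2 | plan.py | is_position_correct
-- ===== SOURCE A (Python) =====
-- def is_position_correct(cell_positions, color, position, orientation_requirements):
--     row, col = position
--     orientation = orientation_requirements[color]
--
--     for other_color, other_position in cell_positions.items():
--         if other_color == color:
--             continue
--         other_row, other_col = other_position
--
--         if orientation == 'north' and row > other_row:
--             return False
--         if orientation == 'south' and row < other_row:
--             return False
--         if orientation == 'east' and col < other_col:
--             return False
--         if orientation == 'west' and col > other_col:
--             return False
--     return True
-- ===== SOURCE B (Python) =====
-- def is_position_correct(cell_positions, color, position, orientation_requirements):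
--     row, col = position
--     orientation = orientation_requirements[color]
--     if orientation in ('north', 'south'):
--         mine = row
--         others = [p[0] for c, p in cell_positions.items() if c != color]
--     else:
--         mine = col
--         others = [p[1] for c, p in cell_positions.items() if c != color]
--     ranked = sorted(others + [mine])
--     if orientation in ('north', 'west'):
--         return ranked[0] == mine
--     if orientation in ('south', 'east'):
--         return ranked[-1] == mine
--     return True
-- ===== Notes on version B (the rewrite author's own statement) =====
-- stated objective: alternative
-- what changed: Instead of A's per-entry four-branch short-circuiting scan, B selects the axis once, ranks the candidate coordinate among the other cells' coordinates by sorting, and answers by checking whether it landed at the required end of the sorted list.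
import Mathlib
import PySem

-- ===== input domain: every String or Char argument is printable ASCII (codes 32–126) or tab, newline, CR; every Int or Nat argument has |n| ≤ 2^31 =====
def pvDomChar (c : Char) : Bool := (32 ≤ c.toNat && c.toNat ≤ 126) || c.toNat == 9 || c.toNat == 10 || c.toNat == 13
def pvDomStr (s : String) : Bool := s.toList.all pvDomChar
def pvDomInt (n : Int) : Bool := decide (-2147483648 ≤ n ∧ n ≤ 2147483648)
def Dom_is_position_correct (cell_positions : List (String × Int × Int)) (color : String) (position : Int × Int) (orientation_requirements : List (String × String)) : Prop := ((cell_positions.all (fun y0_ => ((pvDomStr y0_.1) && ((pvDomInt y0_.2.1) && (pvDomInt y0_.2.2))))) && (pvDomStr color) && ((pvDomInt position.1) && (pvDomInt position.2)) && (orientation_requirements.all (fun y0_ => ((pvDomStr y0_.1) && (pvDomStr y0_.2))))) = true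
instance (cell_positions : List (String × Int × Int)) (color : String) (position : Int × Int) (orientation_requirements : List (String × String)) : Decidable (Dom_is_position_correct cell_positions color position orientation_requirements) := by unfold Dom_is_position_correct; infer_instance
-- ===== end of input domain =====

-- ===== PORT A =====

-- B replaces A's four-branch short-circuiting scan by a rank check: sort the candidate coordinate
-- together with the other cells' coordinates on the relevant axis and test whether it sits at the
-- required end of the sorted list. Both programs raise KeyError when color is not a key of
-- orientation_requirements; Pre_ excludes exactly those inputs.

-- ===== PORT A =====
-- the for-loop of A: early return False on a violated branch, else continue
def pvGoA (color orientation : String) (row col : Int) : List (String × Int × Int) → Bool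
  | [] => true
  | (oc, op) :: rest =>
    if oc == color then pvGoA color orientation row col rest
    else if orientation == "north" && decide (row > op.1) then false
    else if orientation == "south" && decide (row < op.1) then false
    else if orientation == "east" && decide (col < op.2) then false
    else if orientation == "west" && decide (col > op.2) then false
    else pvGoA color orientation row col rest

def is_position_correct (cell_positions : List (String × Int × Int)) (color : String) (position : Int × Int) (orientation_requirements : List (String × String)) : Bool :=
  let row := position.1
  let col := position.2
  match (PySem.Dict.ofList orientation_requirements).get? color with
  | none => false  -- KeyError in Python; excluded by Pre_
  | some orientation => pvGoA color orientation row col (PySem.Dict.ofList cell_positions).items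

-- ===== PORT B =====
def is_position_correct_alt (cell_positions : List (String × Int × Int)) (color : String) (position : Int × Int) (orientation_requirements : List (String × String)) : Bool :=
  let row := position.1
  let col := position.2
  match (PySem.Dict.ofList orientation_requirements).get? color with
  | none => false  -- KeyError in Python; excluded by Pre_
  | some orientation =>
    let onRow := orientation == "north" || orientation == "south"
    let mine := if onRow then row else col
    let others :=
      if onRow then ((PySem.Dict.ofList cell_positions).items.filter (fun p => p.1 != color)).map (fun p => p.2.1)
      else ((PySem.Dict.ofList cell_positions).items.filter (fun p => p.1 != color)).map (fun p => p.2.2)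
    let ranked := PySem.List.sorted (others ++ [mine]) (fun x => x) false
    if orientation == "north" || orientation == "west" then
      match PySem.List.pyGet? ranked 0 with
      | some x => x == mine
      | none => false  -- unreachable: ranked is nonempty
    else if orientation == "south" || orientation == "east" then
      match PySem.List.pyGet? ranked (-1) with
      | some x => x == mine
      | none => false  -- unreachable: ranked is nonempty
    else true

-- ===== PRECONDITION & SPEC =====
-- Pre_: color must be a key of orientation_requirements; otherwise Python's A (and B) raise KeyError.
def Pre_is_position_correct (cell_positions : List (String × Int × Int)) (color : String) (position : Int × Int) (orientation_requirements : List (String × String)) : Prop :=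
  ((PySem.Dict.ofList orientation_requirements).get? color).isSome = true
instance (cell_positions : List (String × Int × Int)) (color : String) (position : Int × Int) (orientation_requirements : List (String × String)) : Decidable (Pre_is_position_correct cell_positions color position orientation_requirements) := by unfold Pre_is_position_correct; infer_instance

def pvWitness_is_position_correct : (List (String × Int × Int)) × String × (Int × Int) × (List (String × String)) :=
  ([("b", 1, 2)], "r", (0, 0), [("r", "north")])

def Spec_is_position_correct (cell_positions : List (String × Int × Int)) (color : String) (position : Int × Int) (orientation_requirements : List (String × String)) (out : Bool) : Prop := out = is_position_correct_alt cell_positions color position orientation_requirements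
instance (cell_positions : List (String × Int × Int)) (color : String) (position : Int × Int) (orientation_requirements : List (String × String)) (out : Bool) : Decidable (Spec_is_position_correct cell_positions color position orientation_requirements out) := by unfold Spec_is_position_correct; infer_instance

-- ===== CLAIM =====
def Claim_equal_is_position_correct : Prop := ∀ (cell_positions : List (String × Int × Int)) (color : String) (position : Int × Int) (orientation_requirements : List (String × String)), Dom_is_position_correct cell_positions color position orientation_requirements → Pre_is_position_correct cell_positions color position orientation_requirements → Spec_is_position_correct cell_positions color position orientation_requirements (is_position_correct cell_positions color position orientation_requirements)

-- ===== LEMMAS AND PROOFS =====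

-- head of sorted(xs ++ [m]) equals m iff m is ≤ every element of xs
theorem pv_sorted_head_eq_iff (m : Int) (xs : List Int) :
    (match PySem.List.pyGet? (PySem.List.sorted (xs ++ [m]) (fun x => x) false) 0 with
      | some x => x == m
      | none => false) = true ↔ ∀ y ∈ xs, m ≤ y := by
  have hne : PySem.List.sorted (xs ++ [m]) (fun x => x) false ≠ [] := by
    simp [PySem.List.sorted_eq_nil_iff]
  obtain ⟨h, t, hht⟩ := List.exists_cons_of_ne_nil hne
  have hle : ∀ y ∈ xs ++ [m], h ≤ y := PySem.List.key_head_sorted_le _ _ hht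
  have hmem : h ∈ xs ++ [m] := by
    have := PySem.List.sorted_perm (xs ++ [m]) (fun x : Int => x) false
    rw [hht] at this
    exact this.mem_iff.mp (by simp)
  rw [hht]
  simp only [PySem.List.pyGet?, PySem.List.pyIdx?]
  norm_num
  constructor
  · intro he y hy
    subst he
    exact hle y (by simp [hy])
  · intro hall
    have h1 : h ≤ m := hle m (by simp)
    rcases List.mem_append.mp hmem with hx | hx
    · exact le_antisymm h1 (hall h hx)
    · simp at hx; omega
  
-- last of sorted(xs ++ [m]) equals m iff m is ≥ every element of xs
-- xs[-1] on a nonempty list is its last element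
theorem pv_pyGet_neg_one {α : Type} (l : List α) (hne : l ≠ []) :
    PySem.List.pyGet? l (-1) = some (l.getLast hne) := by
  have hlen : 1 ≤ l.length := List.length_pos_iff.mpr hne
  simp only [PySem.List.pyGet?, PySem.List.pyIdx?]
  rw [if_neg (by omega), if_pos (by omega)]
  simp only [Option.bind_some, neg_neg, Int.toNat_one]
  rw [← List.getLast?_eq_getElem?, List.getLast?_eq_getLast hne]

-- in a ≤-sorted list every element is at most the last one
theorem pv_pairwise_le_getLast (l : List Int) :
    l.Pairwise (· ≤ ·) → ∀ (hne : l ≠ []), ∀ y ∈ l, y ≤ l.getLast hne := by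
  induction l with
  | nil => intro _ hne; simp at hne
  | cons a t ih =>
    intro hp hne y hy
    have hpt := List.Pairwise.of_cons hp
    have ha : ∀ z ∈ t, a ≤ z := fun z hz => List.rel_of_pairwise_cons hp hz
    cases t with
    | nil => simp at hy; simp [hy, List.getLast]
    | cons b u =>
      rw [List.getLast_cons (by simp)]
      rcases List.mem_cons.mp hy with rfl | hy
      · exact ha _ (List.getLast_mem _)
      · exact ih hpt (by simp) y hy

-- last of sorted(xs ++ [m]) equals m iff m is ≥ every element of xs
theorem pv_sorted_last_eq_iff (m : Int) (xs : List Int) :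
    (match PySem.List.pyGet? (PySem.List.sorted (xs ++ [m]) (fun x => x) false) (-1) with
      | some x => x == m
      | none => false) = true ↔ ∀ y ∈ xs, y ≤ m := by
  have hne : PySem.List.sorted (xs ++ [m]) (fun x => x) false ≠ [] := by
    simp [PySem.List.sorted_eq_nil_iff]
  have hperm := PySem.List.sorted_perm (xs ++ [m]) (fun x : Int => x) false
  have hp : (PySem.List.sorted (xs ++ [m]) (fun x => x) false).Pairwise (· ≤ ·) := by
    simpa using PySem.List.sorted_pairwise (xs ++ [m]) (fun x : Int => x)
  have hge := pv_pairwise_le_getLast _ hp hne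
  set L := PySem.List.sorted (xs ++ [m]) (fun x => x) false with hL
  have hmem : L.getLast hne ∈ xs ++ [m] := hperm.mem_iff.mp (List.getLast_mem hne)
  rw [pv_pyGet_neg_one L hne]
  simp only [beq_iff_eq]
  constructor
  · intro he y hy
    have h2 := hge y (hperm.mem_iff.mpr (by simp [hy]))
    exact le_of_le_of_eq h2 he
  · intro hall
    have h1 : m ≤ L.getLast hne := hge m (hperm.mem_iff.mpr (by simp))
    rcases List.mem_append.mp hmem with hx | hx
    · exact le_antisymm (hall _ hx) h1
    · simpa using hx

theorem pvGoA_north (color : String) (row col : Int) (l : List (String × Int × Int)) :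
    pvGoA color "north" row col l = true ↔ ∀ p ∈ l, ¬(p.1 = color) → row ≤ p.2.1 := by
  induction l with
  | nil => simp [pvGoA]
  | cons p rest ih =>
    obtain ⟨oc, op⟩ := p
    by_cases hc : oc = color
    · simp [pvGoA, hc, ih]
    · by_cases hr : row > op.1
      · simp [pvGoA, hc, hr]
      · simp [pvGoA, hc, hr, ih]
        exact fun _ => by omega

theorem pvGoA_south (color : String) (row col : Int) (l : List (String × Int × Int)) :
    pvGoA color "south" row col l = true ↔ ∀ p ∈ l, ¬(p.1 = color) → p.2.1 ≤ row := by
  induction l with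
  | nil => simp [pvGoA]
  | cons p rest ih =>
    obtain ⟨oc, op⟩ := p
    by_cases hc : oc = color
    · simp [pvGoA, hc, ih]
    · by_cases hr : row < op.1
      · simp [pvGoA, hc, hr]
      · simp [pvGoA, hc, hr, ih]
        exact fun _ => by omega

theorem pvGoA_east (color : String) (row col : Int) (l : List (String × Int × Int)) :
    pvGoA color "east" row col l = true ↔ ∀ p ∈ l, ¬(p.1 = color) → p.2.2 ≤ col := by
  induction l with
  | nil => simp [pvGoA]
  | cons p rest ih =>
    obtain ⟨oc, op⟩ := p
    by_cases hc : oc = color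
    · simp [pvGoA, hc, ih]
    · by_cases hr : col < op.2
      · simp [pvGoA, hc, hr]
      · simp [pvGoA, hc, hr, ih]
        exact fun _ => by omega

theorem pvGoA_west (color : String) (row col : Int) (l : List (String × Int × Int)) :
    pvGoA color "west" row col l = true ↔ ∀ p ∈ l, ¬(p.1 = color) → col ≤ p.2.2 := by
  induction l with
  | nil => simp [pvGoA]
  | cons p rest ih =>
    obtain ⟨oc, op⟩ := p
    by_cases hc : oc = color
    · simp [pvGoA, hc, ih]
    · by_cases hr : col > op.2
      · simp [pvGoA, hc, hr]
      · simp [pvGoA, hc, hr, ih]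
        exact fun _ => by omega

theorem pvGoA_other (color orientation : String) (row col : Int) (l : List (String × Int × Int))
    (h1 : orientation ≠ "north") (h2 : orientation ≠ "south")
    (h3 : orientation ≠ "east") (h4 : orientation ≠ "west") :
    pvGoA color orientation row col l = true := by
  induction l with
  | nil => simp [pvGoA]
  | cons p rest ih =>
    obtain ⟨oc, op⟩ := p
    simp [pvGoA, h1, h2, h3, h4, ih]

-- ===== VERDICT =====
theorem is_position_correct_spec : Claim_equal_is_position_correct := by
  intro cps color pos oreq _ hpre
  unfold Spec_is_position_correct is_position_correct is_position_correct_alt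
  obtain ⟨o, ho⟩ := Option.isSome_iff_exists.mp hpre
  rw [ho]
  simp only []
  by_cases h1 : o = "north"
  · subst h1
    rw [Bool.eq_iff_iff, pvGoA_north]
    simp only [show (("north" : String) == "north") = true from by decide,
      show (("north" : String) == "south") = false from by decide,
      show (("north" : String) == "west") = false from by decide,
      Bool.true_or, Bool.or_true, Bool.false_or, Bool.or_false, Bool.or_self, if_true, if_false, Bool.false_eq_true, ite_false, ite_true]
    rw [pv_sorted_head_eq_iff]
    simp
    tauto
  · by_cases h2 : o = "south"
    · subst h2
      rw [Bool.eq_iff_iff, pvGoA_south]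
      simp only [show (("south" : String) == "north") = false from by decide,
        show (("south" : String) == "south") = true from by decide,
        show (("south" : String) == "east") = false from by decide,
        show (("south" : String) == "west") = false from by decide,
        Bool.true_or, Bool.or_true, Bool.false_or, Bool.or_false, Bool.or_self, if_true, if_false, Bool.false_eq_true, ite_false, ite_true]
      rw [pv_sorted_last_eq_iff]
      simp
      tauto
    · by_cases h3 : o = "east"
      · subst h3
        rw [Bool.eq_iff_iff, pvGoA_east]
        simp only [show (("east" : String) == "north") = false from by decide,
          show (("east" : String) == "south") = false from by decide,
          show (("east" : String) == "east") = true from by decide,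
          show (("east" : String) == "west") = false from by decide,
          Bool.true_or, Bool.or_true, Bool.false_or, Bool.or_false, Bool.or_self, if_true, if_false, Bool.false_eq_true, ite_false, ite_true]
        rw [pv_sorted_last_eq_iff]
        simp
        tauto
      · by_cases h4 : o = "west"
        · subst h4
          rw [Bool.eq_iff_iff, pvGoA_west]
          simp only [show (("west" : String) == "north") = false from by decide,
            show (("west" : String) == "south") = false from by decide,
            show (("west" : String) == "west") = true from by decide,
            Bool.true_or, Bool.or_true, Bool.false_or, Bool.or_false, Bool.or_self, if_true, if_false, Bool.false_eq_true, ite_false, ite_true]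
          rw [pv_sorted_head_eq_iff]
          simp
          tauto
        · have e1 : (o == "north") = false := by simpa using h1
          have e2 : (o == "south") = false := by simpa using h2
          have e3 : (o == "east") = false := by simpa using h3
          have e4 : (o == "west") = false := by simpa using h4
          simp only [e1, e2, e3, e4, Bool.true_or, Bool.or_true, Bool.false_or, Bool.or_false, Bool.or_self, if_true, if_false, Bool.false_eq_true, ite_false, ite_true]
          exact pvGoA_other color o pos.1 pos.2 _ h1 h2 h3 h4
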